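-- pv_equiv track=rewrite | github.com/HoverHell/pyaux | src/pyaux/base.py | mangle_items
-- ===== SOURCE A (Python) =====
-- def mangle_items(items, include=None, exclude=None, add=None, replace=None, replace_inplace=None):
--     """
--     Functional-style dict editing core (working with a list of pairs).
--
--     >>> items = [(1, 2), (3, 4), (5, 6), (7, 8)]
--     >>> mangle_items(items, include=[3, 5], add=[(9, 10)], replace=[(5, 66)])
--     [(3, 4), (9, 10), (5, 66)]
--     >>> mangle_items(items, include=[3, 5], replace_inplace=[(5, 66)])
--     [(3, 4), (5, 66)]
--     >>> mangle_items(items, exclude=[3, 7], add=[(9, 10)])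
--     [(1, 2), (5, 6), (9, 10)]
--     """
--     include = set(include) if include is not None else None
--     exclude = set(exclude) if exclude is not None else None
--
--     if replace is not None:
--         if isinstance(replace, dict):
--             replace = replace.items()
--         add = add + replace
--         exclude = exclude if exclude is not None else set()
--         exclude = exclude | {key for key, val in replace}
--
--     res = items
--     if include is not None:
--         res = [(key, val) for key, val in res if key in include]
--     if replace_inplace is not None:
--         if not isinstance(replace_inplace, dict):
--             replace_inplace = dict(replace_inplace)
--         res = [(key, replace_inplace.get(key, val)) for key, val in res]
--     if exclude is not None:
--         res = [(key, val) for key, val in res if key not in exclude]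
--
--     # Make sure we end up with a copy in any case:
--     if res is items:
--         res = list(items)
--
--     # ... functional-style `update`.
--     # Almost the `dict(input_dict, **add)`, but better.
--     if add is not None:
--         if isinstance(add, dict):
--             add = add.items()
--         res.extend(add)
--     return res
-- ===== SOURCE B (Python) =====
-- def mangle_items(items, include=None, exclude=None, add=None, replace=None, replace_inplace=None):
--     # Single fused pass over items instead of three intermediate list comprehensions.
--     include = set(include) if include is not None else None
--     exclude = set(exclude) if exclude is not None else None
--
--     if replace is not None:
--         if isinstance(replace, dict):
--             replace = replace.items()
--         add = (add if add is not None else []) + list(replace)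
--         exclude = (exclude if exclude is not None else set()) | {key for key, val in replace}
--
--     rmap = None
--     if replace_inplace is not None:
--         rmap = replace_inplace if isinstance(replace_inplace, dict) else dict(replace_inplace)
--
--     res = []
--     for key, val in items:
--         if include is not None and key not in include:
--             continue
--         if rmap is not None:
--             val = rmap.get(key, val)
--         if exclude is not None and key in exclude:
--             continue
--         res.append((key, val))
--
--     if add is not None:
--         res.extend(add.items() if isinstance(add, dict) else add)
--     return res
-- ===== Notes on version B (the rewrite author's own statement) =====
-- stated objective: alternative
-- what changed: Replaced A's three sequential intermediate list comprehensions (include filter, replace_inplace map, exclude filter) with a single fused pass over items that appends to one fresh result list.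
import Mathlib
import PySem

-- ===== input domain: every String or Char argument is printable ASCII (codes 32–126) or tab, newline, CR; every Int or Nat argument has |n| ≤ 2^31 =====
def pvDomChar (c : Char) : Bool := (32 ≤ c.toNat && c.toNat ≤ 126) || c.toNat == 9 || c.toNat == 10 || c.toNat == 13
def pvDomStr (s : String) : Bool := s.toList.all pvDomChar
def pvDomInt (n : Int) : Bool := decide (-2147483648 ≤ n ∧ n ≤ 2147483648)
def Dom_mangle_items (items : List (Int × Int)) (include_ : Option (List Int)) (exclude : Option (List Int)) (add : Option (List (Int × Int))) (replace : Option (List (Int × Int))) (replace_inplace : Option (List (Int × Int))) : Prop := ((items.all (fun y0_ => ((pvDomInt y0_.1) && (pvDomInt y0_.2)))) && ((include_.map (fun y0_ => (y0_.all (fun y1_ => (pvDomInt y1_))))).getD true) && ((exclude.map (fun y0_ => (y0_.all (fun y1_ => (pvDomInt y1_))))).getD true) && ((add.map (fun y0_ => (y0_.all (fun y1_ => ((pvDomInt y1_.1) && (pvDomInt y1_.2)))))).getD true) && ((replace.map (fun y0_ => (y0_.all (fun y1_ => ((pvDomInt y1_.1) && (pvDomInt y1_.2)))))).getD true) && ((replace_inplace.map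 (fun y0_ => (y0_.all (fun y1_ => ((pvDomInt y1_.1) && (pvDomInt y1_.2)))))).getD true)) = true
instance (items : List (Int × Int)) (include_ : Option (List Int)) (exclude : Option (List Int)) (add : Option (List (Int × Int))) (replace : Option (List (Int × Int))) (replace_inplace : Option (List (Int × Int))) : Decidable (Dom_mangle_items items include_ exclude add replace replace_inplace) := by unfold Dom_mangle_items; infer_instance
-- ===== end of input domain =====

-- ===== PORT A =====
-- B fuses A's three intermediate list comprehensions into one pass over items; equal wherever A returns
-- (A raises TypeError when replace is given with add=None, excluded by Pre_).
def mangle_items (items : List (Int × Int)) (include_ : Option (List Int)) (exclude : Option (List Int)) (add : Option (List (Int × Int))) (replace : Option (List (Int × Int))) (replace_inplace : Option (List (Int × Int))) : List (Int × Int) :=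
  let inc : Option (PySem.Set Int) := include_.map PySem.Set.ofList
  let exc : Option (PySem.Set Int) := exclude.map PySem.Set.ofList
  let ae : Option (List (Int × Int)) × Option (PySem.Set Int) :=
    match replace with
    | none => (add, exc)
    | some rep =>
        (some ((add.getD []) ++ rep),
         some (PySem.Set.union (exc.getD PySem.Set.empty) (rep.map Prod.fst)))
  let res := items
  let res := match inc with
    | none => res
    | some i => res.filter (fun p => PySem.Set.contains i p.1)
  let res := match replace_inplace with
    | none => res
    | some ri =>
        let d : PySem.Dict Int Int := PySem.Dict.ofList ri
        res.map (fun p => (p.1, d.getD p.1 p.2))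
  let res := match ae.2 with
    | none => res
    | some e => res.filter (fun p => ! PySem.Set.contains e p.1)
  match ae.1 with
  | none => res
  | some a => res ++ a

-- ===== PORT B =====
-- the 'for key, val in items' loop of Source B, with its three continue-guards
def fusedLoop (inc : Option (PySem.Set Int)) (exc : Option (PySem.Set Int)) (rmap : Option (PySem.Dict Int Int)) (items : List (Int × Int)) : List (Int × Int) :=
  items.foldl
    (fun res p =>
      if (match inc with | none => false | some i => ! PySem.Set.contains i p.1) then res
      else if (match exc with | none => false | some e => PySem.Set.contains e p.1) then res
      else res ++ [(p.1, match rmap with | none => p.2 | some d => d.getD p.1 p.2)]) []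

def mangle_items_alt (items : List (Int × Int)) (include_ : Option (List Int)) (exclude : Option (List Int)) (add : Option (List (Int × Int))) (replace : Option (List (Int × Int))) (replace_inplace : Option (List (Int × Int))) : List (Int × Int) :=
  let inc : Option (PySem.Set Int) := include_.map PySem.Set.ofList
  let exc : Option (PySem.Set Int) := exclude.map PySem.Set.ofList
  let ae : Option (List (Int × Int)) × Option (PySem.Set Int) :=
    match replace with
    | none => (add, exc)
    | some rep =>
        (some ((add.getD []) ++ rep),
         some (PySem.Set.union (exc.getD PySem.Set.empty) (rep.map Prod.fst)))
  let rmap : Option (PySem.Dict Int Int) := replace_inplace.map PySem.Dict.ofList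
  let res := fusedLoop inc ae.2 rmap items
  match ae.1 with
  | none => res
  | some a => res ++ a

-- ===== PRECONDITION & SPEC =====
-- Pre_ excludes exactly the inputs where A raises TypeError: replace given together with add=None ('None + replace').
def Pre_mangle_items (items : List (Int × Int)) (include_ : Option (List Int)) (exclude : Option (List Int)) (add : Option (List (Int × Int))) (replace : Option (List (Int × Int))) (replace_inplace : Option (List (Int × Int))) : Prop :=
  replace = none ∨ add ≠ none
instance (items : List (Int × Int)) (include_ : Option (List Int)) (exclude : Option (List Int)) (add : Option (List (Int × Int))) (replace : Option (List (Int × Int))) (replace_inplace : Option (List (Int × Int))) : Decidable (Pre_mangle_items items include_ exclude add replace replace_inplace) := by unfold Pre_mangle_items; infer_instance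
def pvWitness_mangle_items : (List (Int × Int)) × Option (List Int) × Option (List Int) × (Option (List (Int × Int))) × (Option (List (Int × Int))) × (Option (List (Int × Int))) :=
  ([(1, 2), (3, 4)], some [1, 3], none, some [(9, 10)], some [(3, 66)], none)
def Spec_mangle_items (items : List (Int × Int)) (include_ : Option (List Int)) (exclude : Option (List Int)) (add : Option (List (Int × Int))) (replace : Option (List (Int × Int))) (replace_inplace : Option (List (Int × Int))) (out : List (Int × Int)) : Prop := out = mangle_items_alt items include_ exclude add replace replace_inplace
instance (items : List (Int × Int)) (include_ : Option (List Int)) (exclude : Option (List Int)) (add : Option (List (Int × Int))) (replace : Option (List (Int × Int))) (replace_inplace : Option (List (Int × Int))) (out : List (Int × Int)) : Decidable (Spec_mangle_items items include_ exclude add replace replace_inplace out) := by unfold Spec_mangle_items; infer_instance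

-- ===== CLAIM (what is proved, stated in full; the proofs are below) =====
def Claim_equal_mangle_items : Prop := ∀ (items : List (Int × Int)) (include_ : Option (List Int)) (exclude : Option (List Int)) (add : Option (List (Int × Int))) (replace : Option (List (Int × Int))) (replace_inplace : Option (List (Int × Int))), Dom_mangle_items items include_ exclude add replace replace_inplace → Pre_mangle_items items include_ exclude add replace replace_inplace → Spec_mangle_items items include_ exclude add replace replace_inplace (mangle_items items include_ exclude add replace replace_inplace)

-- ===== LEMMAS AND PROOFS =====

-- B's fused fold with two skip-guards equals a filter-map-filter chain.
theorem fused_fold (s1 s2 : Int → Bool) (g : Int × Int → Int) (l : List (Int × Int)) (acc : List (Int × Int)) :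
    l.foldl (fun res p => if s1 p.1 then res else if s2 p.1 then res else res ++ [(p.1, g p)]) acc
      = acc ++ ((l.filter (fun p => ! s1 p.1)).map (fun p => (p.1, g p))).filter (fun p => ! s2 p.1) := by
  induction l generalizing acc with
  | nil => simp
  | cons h t ih =>
      rw [List.foldl_cons, List.filter_cons]
      cases h1 : s1 h.1
      · cases h2 : s2 h.1
        · simp only [Bool.not_false, if_true, if_false, List.map_cons,
            List.filter_cons, Bool.false_eq_true, h2]
          rw [ih]
          simp
        · simp only [Bool.not_false, Bool.not_true, Bool.false_eq_true, ite_false, ite_true,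
            List.map_cons, List.filter_cons, h2]
          rw [ih]
      · simp only [Bool.not_true, Bool.false_eq_true, ite_false, ite_true]
        rw [ih]

theorem fusedLoop_eq (inc : Option (PySem.Set Int)) (exc : Option (PySem.Set Int)) (rmap : Option (PySem.Dict Int Int)) (items : List (Int × Int)) :
    fusedLoop inc exc rmap items
      = ((items.filter (fun p => ! (match inc with | none => false | some i => ! PySem.Set.contains i p.1))).map
          (fun p => (p.1, match rmap with | none => p.2 | some d => d.getD p.1 p.2))).filter
          (fun p => ! (match exc with | none => false | some e => PySem.Set.contains e p.1)) :=
  (fused_fold (fun k => match inc with | none => false | some i => ! PySem.Set.contains i k)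
    (fun k => match exc with | none => false | some e => PySem.Set.contains e k)
    (fun p => match rmap with | none => p.2 | some d => PySem.Dict.getD d p.1 p.2) items []).trans
    (List.nil_append _)

-- ===== VERDICT (by name: the statement is the Claim_ definition above) =====
theorem mangle_items_spec : Claim_equal_mangle_items := by
  intro items include_ exclude add replace replace_inplace _ hpre
  unfold Spec_mangle_items mangle_items mangle_items_alt
  cases replace with
  | some rep =>
      cases add with
      | none => simp [Pre_mangle_items] at hpre
      | some a =>
          cases include_ <;> cases replace_inplace <;>
            simp [fusedLoop_eq]
  | none =>
      cases include_ <;> cases replace_inplace <;> cases exclude <;> cases add <;>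
        simp [fusedLoop_eq]
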